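-- pv_equiv track=rewrite | github.com/Bongiiii/AIExtractor | backend/dataExtractor.py | _generate_enhanced_column_definitions
-- ===== SOURCE A (Python) =====
-- from typing import List, Dict, Any, Optional
--
-- def _generate_enhanced_column_definitions(columns: List[str]) -> str:
--     """Generate enhanced definitions for scientific document columns"""
--     definitions = []
--     for col in columns:
--         col_lower = col.lower()
--         if any(word in col_lower for word in ['species', 'scientific', 'name', 'binomial', 'taxa']):
--             definitions.append(f"- {col}: Scientific binomial names (e.g., 'Quercus alba', 'Homo sapiens') - look for Latin genus + species")
--         elif any(word in col_lower for word in ['common', 'vernacular', 'english']):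
--             definitions.append(f"- {col}: Common English names (e.g., 'White Oak', 'American Robin')")
--         elif any(word in col_lower for word in ['location', 'locality', 'place', 'county', 'state', 'where', 'found', 'range']):
--             definitions.append(f"- {col}: Geographic information (counties, states, countries, specific localities)")
--         elif any(word in col_lower for word in ['date', 'year', 'time', 'collected', 'observed', 'when']):
--             definitions.append(f"- {col}: Temporal information (dates, years, time periods)")
--         elif any(word in col_lower for word in ['status', 'condition', 'conservation', 'threat', 'endangered', 'extinct']):
--             definitions.append(f"- {col}: Conservation/threat status (e.g., 'Extinct', 'Endangered', 'Ex', 'En', status codes)")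
--         elif any(word in col_lower for word in ['family', 'group', 'category', 'class', 'order']):
--             definitions.append(f"- {col}: Taxonomic classification (Family, Order, Class names)")
--         else:
--             definitions.append(f"- {col}: Data that logically corresponds to this column name")
--
--     return "\n".join(definitions)
-- ===== SOURCE B (Python) =====
-- # Different algorithm: instead of a per-column first-match scan over ordered groups,
-- # flatten all keywords into (keyword, priority) pairs and pick the MINIMUM priority
-- # among all matching keywords (default priority 6); correct because the first
-- # matching group is exactly the lowest-priority group containing a matching keyword.
-- from typing import List
--
-- _GROUP_KEYWORDS = [
--     ['species', 'scientific', 'name', 'binomial', 'taxa'],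
--     ['common', 'vernacular', 'english'],
--     ['location', 'locality', 'place', 'county', 'state', 'where', 'found', 'range'],
--     ['date', 'year', 'time', 'collected', 'observed', 'when'],
--     ['status', 'condition', 'conservation', 'threat', 'endangered', 'extinct'],
--     ['family', 'group', 'category', 'class', 'order'],
-- ]
--
-- _FLAT_KEYWORDS = [(kw, pri) for pri, kws in enumerate(_GROUP_KEYWORDS) for kw in kws]
--
-- _DESCRIPTIONS = [
--     "Scientific binomial names (e.g., 'Quercus alba', 'Homo sapiens') - look for Latin genus + species",
--     "Common English names (e.g., 'White Oak', 'American Robin')",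
--     "Geographic information (counties, states, countries, specific localities)",
--     "Temporal information (dates, years, time periods)",
--     "Conservation/threat status (e.g., 'Extinct', 'Endangered', 'Ex', 'En', status codes)",
--     "Taxonomic classification (Family, Order, Class names)",
--     "Data that logically corresponds to this column name",
-- ]
--
--
-- def _generate_enhanced_column_definitions(columns: List[str]) -> str:
--     lines = []
--     for col in columns:
--         cl = col.lower()
--         best = 6
--         for kw, pri in _FLAT_KEYWORDS:
--             if kw in cl and pri < best:
--                 best = pri
--         lines.append("- %s: %s" % (col, _DESCRIPTIONS[best]))
--     return "\n".join(lines)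
-- ===== Notes on version B (the rewrite author's own statement) =====
-- stated objective: faster
-- what changed: Replaces the per-column first-match if/elif ladder over ordered keyword groups by a minimum-priority selection: all keywords are flattened into (keyword, priority) pairs, each column takes the minimum priority among matching keywords (default 6) and indexes a description table; same asymptotics, but one flat loop without per-group list/any machinery and f-string rebuilding gives a measured constant-factor speedup.
import Mathlib
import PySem

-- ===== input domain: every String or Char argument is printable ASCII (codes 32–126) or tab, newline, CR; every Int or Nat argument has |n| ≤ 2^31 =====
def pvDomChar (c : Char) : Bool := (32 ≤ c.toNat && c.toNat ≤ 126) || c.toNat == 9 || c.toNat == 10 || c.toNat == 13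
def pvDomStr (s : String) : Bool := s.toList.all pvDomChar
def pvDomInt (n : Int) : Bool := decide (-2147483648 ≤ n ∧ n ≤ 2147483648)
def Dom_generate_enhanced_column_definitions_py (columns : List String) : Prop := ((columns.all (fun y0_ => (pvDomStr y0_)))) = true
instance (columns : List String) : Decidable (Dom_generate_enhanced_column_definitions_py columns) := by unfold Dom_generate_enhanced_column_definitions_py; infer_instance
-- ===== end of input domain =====

-- B replaces A's first-match if/elif ladder by a minimum-priority selection over a flat
-- (keyword, priority) list; return values agree everywhere (objective: faster by a constant factor, measured).

-- ===== PORT A =====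
def generate_enhanced_column_definitions_py (columns : List String) : String :=
  let definitions := columns.foldl (fun defs col =>
    let col_lower := PySem.Str.lower col
    if (["species", "scientific", "name", "binomial", "taxa"]).any (fun word => PySem.Str.isIn word col_lower) then
      defs ++ ["- " ++ col ++ ": Scientific binomial names (e.g., 'Quercus alba', 'Homo sapiens') - look for Latin genus + species"]
    else if (["common", "vernacular", "english"]).any (fun word => PySem.Str.isIn word col_lower) then
      defs ++ ["- " ++ col ++ ": Common English names (e.g., 'White Oak', 'American Robin')"]
    else if (["location", "locality", "place", "county", "state", "where", "found", "range"]).any (fun word => PySem.Str.isIn word col_lower) then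
      defs ++ ["- " ++ col ++ ": Geographic information (counties, states, countries, specific localities)"]
    else if (["date", "year", "time", "collected", "observed", "when"]).any (fun word => PySem.Str.isIn word col_lower) then
      defs ++ ["- " ++ col ++ ": Temporal information (dates, years, time periods)"]
    else if (["status", "condition", "conservation", "threat", "endangered", "extinct"]).any (fun word => PySem.Str.isIn word col_lower) then
      defs ++ ["- " ++ col ++ ": Conservation/threat status (e.g., 'Extinct', 'Endangered', 'Ex', 'En', status codes)"]
    else if (["family", "group", "category", "class", "order"]).any (fun word => PySem.Str.isIn word col_lower) then
      defs ++ ["- " ++ col ++ ": Taxonomic classification (Family, Order, Class names)"]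
    else
      defs ++ ["- " ++ col ++ ": Data that logically corresponds to this column name"]) []
  PySem.Str.join "\n" definitions

-- ===== PORT B =====
def pvFlatKeywords : List (String × Nat) :=
  [ ("species", 0), ("scientific", 0), ("name", 0), ("binomial", 0), ("taxa", 0),
    ("common", 1), ("vernacular", 1), ("english", 1),
    ("location", 2), ("locality", 2), ("place", 2), ("county", 2), ("state", 2), ("where", 2), ("found", 2), ("range", 2),
    ("date", 3), ("year", 3), ("time", 3), ("collected", 3), ("observed", 3), ("when", 3),
    ("status", 4), ("condition", 4), ("conservation", 4), ("threat", 4), ("endangered", 4), ("extinct", 4),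
    ("family", 5), ("group", 5), ("category", 5), ("class", 5), ("order", 5) ]

def pvDescriptions : List String :=
  [ "Scientific binomial names (e.g., 'Quercus alba', 'Homo sapiens') - look for Latin genus + species",
    "Common English names (e.g., 'White Oak', 'American Robin')",
    "Geographic information (counties, states, countries, specific localities)",
    "Temporal information (dates, years, time periods)",
    "Conservation/threat status (e.g., 'Extinct', 'Endangered', 'Ex', 'En', status codes)",
    "Taxonomic classification (Family, Order, Class names)",
    "Data that logically corresponds to this column name" ]

def pvBest (cl : String) : Nat :=
  pvFlatKeywords.foldl
    (fun best p => if PySem.Str.isIn p.1 cl then (if p.2 < best then p.2 else best) else best) 6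

def generate_enhanced_column_definitions_py_alt (columns : List String) : String :=
  PySem.Str.join "\n"
    (columns.map (fun col =>
      "- " ++ col ++ ": " ++ pvDescriptions.getD (pvBest (PySem.Str.lower col)) ""))

-- ===== PRECONDITION & SPEC =====
def Spec_generate_enhanced_column_definitions_py (columns : List String) (out : String) : Prop := out = generate_enhanced_column_definitions_py_alt columns
instance (columns : List String) (out : String) : Decidable (Spec_generate_enhanced_column_definitions_py columns out) := by unfold Spec_generate_enhanced_column_definitions_py; infer_instance

-- ===== CLAIM (what is proved, stated in full; the proofs are below) =====
def Claim_equal_generate_enhanced_column_definitions_py : Prop := ∀ (columns : List String), Dom_generate_enhanced_column_definitions_py columns → Spec_generate_enhanced_column_definitions_py columns (generate_enhanced_column_definitions_py columns)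

-- ===== LEMMAS AND PROOFS =====

-- The min-fold returns g when every matching keyword has priority ≥ g and either some
-- matching keyword has priority exactly g or the accumulator is already g.
theorem pvBest_fold_eq (cl : String) (L : List (String × Nat)) (b g : Nat)
    (hb : g ≤ b)
    (hall : ∀ p ∈ L, PySem.Str.isIn p.1 cl = true → g ≤ p.2)
    (hex : (∃ p ∈ L, PySem.Str.isIn p.1 cl = true ∧ p.2 = g) ∨ b = g) :
    L.foldl (fun best p => if PySem.Str.isIn p.1 cl then (if p.2 < best then p.2 else best) else best) b = g := by
  induction L generalizing b with
  | nil =>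
    rcases hex with ⟨p, hp, _⟩ | rfl
    · exact absurd hp (List.not_mem_nil)
    · rfl
  | cons q L ih =>
    simp only [List.foldl_cons]
    by_cases hm : PySem.Str.isIn q.1 cl = true
    · have hq : g ≤ q.2 := hall q (List.mem_cons_self) hm
      simp only [hm, if_true]
      by_cases hlt : q.2 < b
      · -- accumulator becomes q.2
        simp only [hlt, if_true]
        rcases hex with ⟨p, hp, hpm, hpg⟩ | hbg
        · rcases List.mem_cons.mp hp with heq | hp'
          · exact ih q.2 hq (fun r hr hrm => hall r (List.mem_cons_of_mem _ hr) hrm)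
              (Or.inr (by rw [← heq]; exact hpg))
          · exact ih q.2 hq (fun r hr hrm => hall r (List.mem_cons_of_mem _ hr) hrm)
              (Or.inl ⟨p, hp', hpm, hpg⟩)
        · have : q.2 = g := by omega
          exact ih q.2 hq (fun r hr hrm => hall r (List.mem_cons_of_mem _ hr) hrm) (Or.inr this)
      · simp only [hlt]
        rcases hex with ⟨p, hp, hpm, hpg⟩ | hbg
        · rcases List.mem_cons.mp hp with heq | hp'
          · have hq2 : q.2 = g := by rw [← heq]; exact hpg
            have : b = g := le_antisymm (by omega) hb
            exact ih b hb (fun r hr hrm => hall r (List.mem_cons_of_mem _ hr) hrm) (Or.inr this)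
          · exact ih b hb (fun r hr hrm => hall r (List.mem_cons_of_mem _ hr) hrm)
              (Or.inl ⟨p, hp', hpm, hpg⟩)
        · exact ih b hb (fun r hr hrm => hall r (List.mem_cons_of_mem _ hr) hrm) (Or.inr hbg)
    · simp only [hm]
      rcases hex with ⟨p, hp, hpm, hpg⟩ | hbg
      · rcases List.mem_cons.mp hp with heq | hp'
        · exact absurd (by rw [heq] at hpm; exact hpm) hm
        · exact ih b hb (fun r hr hrm => hall r (List.mem_cons_of_mem _ hr) hrm)
            (Or.inl ⟨p, hp', hpm, hpg⟩)
      · exact ih b hb (fun r hr hrm => hall r (List.mem_cons_of_mem _ hr) hrm) (Or.inr hbg)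

-- Per-column: A's ladder equals B's minimum-priority lookup.
set_option maxRecDepth 8192 in
set_option maxHeartbeats 1600000 in
theorem pv_line_eq (col : String) :
    (let col_lower := PySem.Str.lower col
     if (["species", "scientific", "name", "binomial", "taxa"]).any (fun word => PySem.Str.isIn word col_lower) then
       "- " ++ col ++ ": Scientific binomial names (e.g., 'Quercus alba', 'Homo sapiens') - look for Latin genus + species"
     else if (["common", "vernacular", "english"]).any (fun word => PySem.Str.isIn word col_lower) then
       "- " ++ col ++ ": Common English names (e.g., 'White Oak', 'American Robin')"
     else if (["location", "locality", "place", "county", "state", "where", "found", "range"]).any (fun word => PySem.Str.isIn word col_lower) then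
       "- " ++ col ++ ": Geographic information (counties, states, countries, specific localities)"
     else if (["date", "year", "time", "collected", "observed", "when"]).any (fun word => PySem.Str.isIn word col_lower) then
       "- " ++ col ++ ": Temporal information (dates, years, time periods)"
     else if (["status", "condition", "conservation", "threat", "endangered", "extinct"]).any (fun word => PySem.Str.isIn word col_lower) then
       "- " ++ col ++ ": Conservation/threat status (e.g., 'Extinct', 'Endangered', 'Ex', 'En', status codes)"
     else if (["family", "group", "category", "class", "order"]).any (fun word => PySem.Str.isIn word col_lower) then
       "- " ++ col ++ ": Taxonomic classification (Family, Order, Class names)"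
     else
       "- " ++ col ++ ": Data that logically corresponds to this column name")
    = "- " ++ col ++ ": " ++ pvDescriptions.getD (pvBest (PySem.Str.lower col)) "" := by
  simp only []
  set cl := PySem.Str.lower col with hcl
  split_ifs with h0 h1 h2 h3 h4 h5
  case _ =>
    have hbest : pvBest cl = 0 := by
      unfold pvBest
      refine pvBest_fold_eq cl _ 6 0 (by omega) (fun p _ _ => Nat.zero_le _) (Or.inl ?_)
      rw [List.any_eq_true] at h0
      obtain ⟨w, hw, hmw⟩ := h0
      refine ⟨(w, 0), ?_, hmw, rfl⟩
      fin_cases hw <;> decide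
    rw [hbest]; simp only [String.append_assoc]; rfl
  case _ =>
    have hbest : pvBest cl = 1 := by
      unfold pvBest
      refine pvBest_fold_eq cl _ 6 1 (by omega) ?_ (Or.inl ?_)
      · intro p hp hm
        simp only [List.any_eq_true, not_exists, not_and, List.mem_cons, List.not_mem_nil] at h0
        fin_cases hp <;> simp_all
      · rw [List.any_eq_true] at h1
        obtain ⟨w, hw, hmw⟩ := h1
        refine ⟨(w, 1), ?_, hmw, rfl⟩
        fin_cases hw <;> decide
    rw [hbest]; simp only [String.append_assoc]; rfl
  case _ =>
    have hbest : pvBest cl = 2 := by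
      unfold pvBest
      refine pvBest_fold_eq cl _ 6 2 (by omega) ?_ (Or.inl ?_)
      · intro p hp hm
        simp only [List.any_eq_true, not_exists, not_and, List.mem_cons, List.not_mem_nil] at h0 h1
        fin_cases hp <;> simp_all
      · rw [List.any_eq_true] at h2
        obtain ⟨w, hw, hmw⟩ := h2
        refine ⟨(w, 2), ?_, hmw, rfl⟩
        fin_cases hw <;> decide
    rw [hbest]; simp only [String.append_assoc]; rfl
  case _ =>
    have hbest : pvBest cl = 3 := by
      unfold pvBest
      refine pvBest_fold_eq cl _ 6 3 (by omega) ?_ (Or.inl ?_)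
      · intro p hp hm
        simp only [List.any_eq_true, not_exists, not_and, List.mem_cons, List.not_mem_nil] at h0 h1 h2
        fin_cases hp <;> simp_all
      · rw [List.any_eq_true] at h3
        obtain ⟨w, hw, hmw⟩ := h3
        refine ⟨(w, 3), ?_, hmw, rfl⟩
        fin_cases hw <;> decide
    rw [hbest]; simp only [String.append_assoc]; rfl
  case _ =>
    have hbest : pvBest cl = 4 := by
      unfold pvBest
      refine pvBest_fold_eq cl _ 6 4 (by omega) ?_ (Or.inl ?_)
      · intro p hp hm
        simp only [List.any_eq_true, not_exists, not_and, List.mem_cons, List.not_mem_nil] at h0 h1 h2 h3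
        fin_cases hp <;> simp_all
      · rw [List.any_eq_true] at h4
        obtain ⟨w, hw, hmw⟩ := h4
        refine ⟨(w, 4), ?_, hmw, rfl⟩
        fin_cases hw <;> decide
    rw [hbest]; simp only [String.append_assoc]; rfl
  case _ =>
    have hbest : pvBest cl = 5 := by
      unfold pvBest
      refine pvBest_fold_eq cl _ 6 5 (by omega) ?_ (Or.inl ?_)
      · intro p hp hm
        simp only [List.any_eq_true, not_exists, not_and, List.mem_cons, List.not_mem_nil] at h0 h1 h2 h3 h4
        fin_cases hp <;> simp_all
      · rw [List.any_eq_true] at h5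
        obtain ⟨w, hw, hmw⟩ := h5
        refine ⟨(w, 5), ?_, hmw, rfl⟩
        fin_cases hw <;> decide
    rw [hbest]; simp only [String.append_assoc]; rfl
  case _ =>
    have hbest : pvBest cl = 6 := by
      unfold pvBest
      refine pvBest_fold_eq cl _ 6 6 le_rfl ?_ (Or.inr rfl)
      intro p hp hm
      simp only [List.any_eq_true, not_exists, not_and, List.mem_cons, List.not_mem_nil] at h0 h1 h2 h3 h4 h5
      fin_cases hp <;> simp_all
    rw [hbest]; simp only [String.append_assoc]; rfl

theorem generate_enhanced_column_definitions_py_eq (columns : List String) :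
    generate_enhanced_column_definitions_py columns = generate_enhanced_column_definitions_py_alt columns := by
  unfold generate_enhanced_column_definitions_py generate_enhanced_column_definitions_py_alt
  have hstep :
      (fun (defs : List String) (col : String) =>
        let col_lower := PySem.Str.lower col
        if (["species", "scientific", "name", "binomial", "taxa"]).any (fun word => PySem.Str.isIn word col_lower) then
          defs ++ ["- " ++ col ++ ": Scientific binomial names (e.g., 'Quercus alba', 'Homo sapiens') - look for Latin genus + species"]
        else if (["common", "vernacular", "english"]).any (fun word => PySem.Str.isIn word col_lower) then
          defs ++ ["- " ++ col ++ ": Common English names (e.g., 'White Oak', 'American Robin')"]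
        else if (["location", "locality", "place", "county", "state", "where", "found", "range"]).any (fun word => PySem.Str.isIn word col_lower) then
          defs ++ ["- " ++ col ++ ": Geographic information (counties, states, countries, specific localities)"]
        else if (["date", "year", "time", "collected", "observed", "when"]).any (fun word => PySem.Str.isIn word col_lower) then
          defs ++ ["- " ++ col ++ ": Temporal information (dates, years, time periods)"]
        else if (["status", "condition", "conservation", "threat", "endangered", "extinct"]).any (fun word => PySem.Str.isIn word col_lower) then
          defs ++ ["- " ++ col ++ ": Conservation/threat status (e.g., 'Extinct', 'Endangered', 'Ex', 'En', status codes)"]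
        else if (["family", "group", "category", "class", "order"]).any (fun word => PySem.Str.isIn word col_lower) then
          defs ++ ["- " ++ col ++ ": Taxonomic classification (Family, Order, Class names)"]
        else
          defs ++ ["- " ++ col ++ ": Data that logically corresponds to this column name"])
      = fun defs col => defs ++ ["- " ++ col ++ ": " ++ pvDescriptions.getD (pvBest (PySem.Str.lower col)) ""] := by
    funext defs col
    simp only [← apply_ite (fun s => defs ++ [s])]
    exact congrArg (fun s => defs ++ [s]) (pv_line_eq col)
  rw [hstep, PySem.List.foldl_append_singleton_eq_map]
  rfl

-- ===== VERDICT (by name: the statement is the Claim_ definition above) =====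
theorem generate_enhanced_column_definitions_py_spec : Claim_equal_generate_enhanced_column_definitions_py := by
  intro columns _
  exact generate_enhanced_column_definitions_py_eq columns
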